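-- pv_equiv track=rewrite | github.com/cirosantilli/project-euler-solvers | solvers/586.py | factor_multisets
-- ===== SOURCE A (Python) =====
-- def factor_multisets(target: int) -> list[list[int]]:
--     """
--     All nondecreasing factor multisets (>=2) whose product is target.
--     Example: 80 -> [2,2,2,2,5], [2,40], [80], ...
--     """
--     res: list[list[int]] = []
--
--     def rec(rem: int, start: int, cur: list[int]) -> None:
--         if rem == 1:
--             res.append(cur.copy())
--             return
--         for f in range(start, rem + 1):
--             if f < 2:
--                 continue
--             if rem % f == 0:
--                 cur.append(f)
--                 rec(rem // f, f, cur)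
--                 cur.pop()
--
--     rec(target, 2, [])
--     return res
-- ===== SOURCE B (Python) =====
-- def factor_multisets(target: int) -> list[list[int]]:
--     """
--     All nondecreasing factor multisets (>=2) whose product is target.
--     Iterative depth-first search with an explicit stack of (rem, start, cur)
--     frames; each expansion scans candidate divisors only while f*f <= rem and
--     pushes the one-factor tail [rem] as the last child, so only O(sqrt(rem))
--     candidates are tried per node instead of A's scan of start..rem.
--     """
--     res: list[list[int]] = []
--     stack: list[tuple[int, int, list[int]]] = [(target, 2, [])]
--     while stack:
--         rem, start, cur = stack.pop()
--         if rem == 1: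
--             res.append(cur)
--             continue
--         if rem < 2:
--             continue
--         children: list[tuple[int, int, list[int]]] = []
--         f = start
--         while f * f <= rem:
--             if rem % f == 0:
--                 children.append((rem // f, f, cur + [f]))
--             f += 1
--         if start <= rem:
--             children.append((1, start, cur + [rem]))
--         stack.extend(reversed(children))
--     return res
-- ===== Notes on version B (the rewrite author's own statement) =====
-- stated objective: faster
-- what changed: B replaces A's recursive backtracking (which scans every f from start to rem at each node) with an iterative depth-first search over an explicit stack of (rem,start,cur) frames, where each expansion scans candidate divisors only while f*f <= rem and pushes the single-factor tail [rem] as the last child.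
import Mathlib
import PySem

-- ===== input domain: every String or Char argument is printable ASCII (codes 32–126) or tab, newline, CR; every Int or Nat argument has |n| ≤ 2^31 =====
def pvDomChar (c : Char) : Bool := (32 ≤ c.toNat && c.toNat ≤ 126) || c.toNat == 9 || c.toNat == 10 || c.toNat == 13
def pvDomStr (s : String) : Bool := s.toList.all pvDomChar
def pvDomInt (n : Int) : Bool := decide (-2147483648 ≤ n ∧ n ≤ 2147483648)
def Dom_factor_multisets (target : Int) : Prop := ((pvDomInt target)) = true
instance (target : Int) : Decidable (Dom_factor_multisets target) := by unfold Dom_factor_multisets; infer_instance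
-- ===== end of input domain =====

-- B replaces A's recursion (scanning every f from start to rem per node) by an iterative
-- DFS over an explicit stack of (rem, start, cur) frames whose expansion scans divisors
-- only while f*f ≤ rem and pushes the tail [rem] as last child (objective: faster).

-- toNat measure fact used by the termination arguments of both ports (kept small and shared)
lemma pvToNatDec (rem f : Int) (hfr : f ≤ rem) :
    (rem + 1 - (f + 1)).toNat < (rem + 1 - f).toNat := by
  rw [Int.toNat_lt_toNat (sub_pos.mpr (Int.lt_add_one_iff.mpr hfr))]
  exact sub_lt_sub_left (lt_add_one f) (rem + 1)

-- termination helper for port A: dividing a positive rem by f ≥ 2 shrinks it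
lemma pvDivLt {rem f : Int} (h0 : 0 < rem) (hf : 2 ≤ f) :
    (PySem.Int.floordiv rem f).toNat < rem.toNat := by
  have hf0 : (0:Int) < f := lt_of_lt_of_le two_pos hf
  rw [PySem.Int.floordiv_eq_ediv_of_pos hf0, Int.toNat_lt_toNat h0]
  exact Int.ediv_lt_self_of_pos_of_ne_one h0 (by omega)

-- ===== PORT A =====
-- rec(rem, start, cur): returns the list of completed multisets in emission order
-- (Python mutates 'res'; the port returns the emitted lists, concatenated in loop order).
-- The 'for f in range(start, rem+1)' loop is ported as the counting recursion loopA over f.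
mutual
def recA (rem start : Int) (cur : List Int) : List (List Int) :=
  if rem == 1 then [cur]
  else loopA rem start cur
termination_by (rem.toNat, (rem + 1 - start).toNat + 1)
decreasing_by
  apply Prod.Lex.right; exact Nat.lt_succ_self _

def loopA (rem f : Int) (cur : List Int) : List (List Int) :=
  if f ≤ rem then
    (if f < 2 then []
     else if PySem.Int.mod rem f == 0 then recA (PySem.Int.floordiv rem f) f (cur ++ [f])
     else []) ++ loopA rem (f + 1) cur
  else []
termination_by (rem.toNat, (rem + 1 - f).toNat)
decreasing_by
· apply Prod.Lex.left
  exact pvDivLt (by omega) (by omega)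
· apply Prod.Lex.right; exact pvToNatDec rem f (by assumption)
end

def factor_multisets (target : Int) : List (List Int) :=
  recA target 2 []

-- ===== PORT B =====
-- termination helper for the inner while loop: f*f ≤ rem forces f ≤ rem
lemma pvSqLe {rem f : Int} (h : f * f ≤ rem) : f ≤ rem := by
  by_cases hf : f ≤ 0
  · exact hf.trans ((mul_self_nonneg f).trans h)
  · have hf' : (0:Int) < f := by omega
    have h1 : f * 1 ≤ f * f := mul_le_mul_of_nonneg_left (by omega) hf'.le
    rw [mul_one] at h1
    exact h1.trans h

lemma pvHalf {q rem : Int} (h0 : 0 ≤ q) (h2 : 2 * q ≤ rem) : q.toNat ≤ rem.toNat / 2 := by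
  have hr : 0 ≤ rem := le_trans (mul_nonneg (by norm_num) h0) h2
  have h1 : q ≤ rem / 2 := by
    rw [Int.le_ediv_iff_mul_le (by norm_num), mul_comm]
    exact h2
  have h3 : q.toNat ≤ (rem / 2).toNat := Int.toNat_le_toNat h1
  have h4 : (rem / 2).toNat = rem.toNat / 2 := by
    obtain ⟨n, rfl⟩ := Int.eq_ofNat_of_zero_le hr
    rw [show ((2:Int)) = ((2:Nat):Int) from rfl, ← Int.natCast_ediv, Int.toNat_natCast,
      Int.toNat_natCast]
  rw [h4] at h3; exact h3

lemma pvGe2 {rem : Int} (h2 : ¬ rem < 2) : 2 ≤ rem := by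
  omega

-- the inner 'while f * f <= rem' loop of B: the list of divisor child frames, in order
def childrenB (rem f : Int) (cur : List Int) : List (Int × Int × List Int) :=
  if f * f ≤ rem then
    (if PySem.Int.mod rem f == 0 then [(PySem.Int.floordiv rem f, f, cur ++ [f])] else [])
      ++ childrenB rem (f + 1) cur
  else []
termination_by (rem + 1 - f).toNat
decreasing_by
  exact pvToNatDec rem f (pvSqLe (by assumption))

-- weight of a frame and of a whole stack, the termination measure of the stack loop
def pvW (rem : Int) : Nat := 4 ^ rem.toNat
def pvMu (st : List (Int × Int × List Int)) : Nat := (st.map (fun fr => pvW fr.1)).sum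

lemma pvWpos (rem : Int) : 0 < pvW rem := by
  simp only [pvW]
  exact Nat.pow_pos (by norm_num)

lemma pvMuCons (r s : Int) (c : List Int) (rest : List (Int × Int × List Int)) :
    pvMu ((r, s, c) :: rest) = pvW r + pvMu rest := by
  simp [pvMu]

lemma pvMuAppend (a b : List (Int × Int × List Int)) : pvMu (a ++ b) = pvMu a + pvMu b := by
  simp [pvMu]

lemma childrenB_mem : ∀ (k : Nat) (rem f : Int), (rem + 1 - f).toNat = k →
    ∀ (cur : List Int) (fr : Int × Int × List Int), fr ∈ childrenB rem f cur →
      f ≤ fr.2.1 ∧ fr.2.1 * fr.2.1 ≤ rem ∧ fr.1 = PySem.Int.floordiv rem fr.2.1 := by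
  intro k
  induction k using Nat.strong_induction_on with
  | _ k IH =>
    intro rem f hk cur fr hm
    rw [childrenB] at hm
    by_cases hsq : f * f ≤ rem
    · rw [if_pos hsq] at hm
      have hfr : f ≤ rem := pvSqLe hsq
      rcases List.mem_append.mp hm with hm1 | hm2
      · by_cases hmod : PySem.Int.mod rem f == 0
        · rw [if_pos hmod] at hm1
          simp at hm1
          subst hm1
          exact ⟨le_refl f, hsq, rfl⟩
        · rw [if_neg hmod] at hm1; simp at hm1
      · have hlt : (rem + 1 - (f + 1)).toNat < k := by
          rw [← hk]; exact pvToNatDec rem f hfr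
        have := IH ((rem + 1 - (f + 1)).toNat) hlt rem (f + 1) rfl cur fr hm2
        exact ⟨le_trans (by linarith) this.1, this.2.1, this.2.2⟩
    · rw [if_neg hsq] at hm; simp at hm

lemma childrenB_length : ∀ (k : Nat) (rem f : Int), (rem + 1 - f).toNat = k →
    ∀ (cur : List Int), (childrenB rem f cur).length ≤ (rem + 1 - f).toNat := by
  intro k
  induction k using Nat.strong_induction_on with
  | _ k IH =>
    intro rem f hk cur
    rw [childrenB]
    by_cases hsq : f * f ≤ rem
    · rw [if_pos hsq]
      have hfr : f ≤ rem := pvSqLe hsq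
      have hlt : (rem + 1 - (f + 1)).toNat < k := by
        rw [← hk]; exact pvToNatDec rem f hfr
      have h2 := IH ((rem + 1 - (f + 1)).toNat) hlt rem (f + 1) rfl cur
      rw [List.length_append]
      have h1 : (if PySem.Int.mod rem f == 0
          then [(PySem.Int.floordiv rem f, f, cur ++ [f])] else []).length ≤ 1 := by
        split_ifs <;> simp
      have h3 := pvToNatDec rem f hfr
      have h4 := Nat.add_le_add h1 h2
      have h5 : 1 + (rem + 1 - (f + 1)).toNat ≤ (rem + 1 - f).toNat := by
        rw [Nat.add_comm]; exact Nat.succ_le_of_lt h3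
      exact le_trans h4 h5
    · rw [if_neg hsq]; simp

-- each divisor child's weight is at most 4^(rem.toNat / 2)
lemma childrenB_weight {rem f : Int} (hf : 2 ≤ f) (hr : 0 ≤ rem) {cur : List Int}
    {fr : Int × Int × List Int} (hm : fr ∈ childrenB rem f cur) :
    pvW fr.1 ≤ 4 ^ (rem.toNat / 2) := by
  obtain ⟨hle, hsq, heq⟩ := childrenB_mem ((rem + 1 - f).toNat) rem f rfl cur fr hm
  set g := fr.2.1 with hg
  have hg2 : 2 ≤ g := le_trans hf hle
  have hg0 : 0 < g := by linarith
  have hfd : PySem.Int.floordiv rem g = rem / g := PySem.Int.floordiv_eq_ediv_of_pos hg0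
  have hq0 : 0 ≤ rem / g := Int.ediv_nonneg hr hg0.le
  have hqg : rem / g * g ≤ rem := Int.ediv_mul_le rem (by linarith)
  have h2q : rem / g * 2 ≤ rem / g * g := mul_le_mul_of_nonneg_left hg2 hq0
  have hbound : 2 * (rem / g) ≤ rem := by
    calc 2 * (rem / g) = rem / g * 2 := mul_comm _ _
      _ ≤ rem / g * g := h2q
      _ ≤ rem := hqg
  have htn : fr.1.toNat ≤ rem.toNat / 2 := by
    rw [heq, hfd]; exact pvHalf hq0 hbound
  calc pvW fr.1 = 4 ^ fr.1.toNat := rfl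
    _ ≤ 4 ^ (rem.toNat / 2) := Nat.pow_le_pow_right (by norm_num) htn

lemma pvTwoPow (n : Nat) (h : 2 ≤ n) : n + 2 ≤ 2 ^ n := by
  induction n with
  | zero => omega
  | succ m IH =>
    by_cases hm : 2 ≤ m
    · have h1 := IH hm
      rw [pow_succ, mul_two]
      have h2m : 1 ≤ 2 ^ m := Nat.one_le_two_pow
      omega
    · have hm1 : m = 1 := by omega
      subst hm1
      norm_num

lemma pvArithCore (n m L : Nat) (hn : 2 ≤ n) (hL : L ≤ n - 1)
    (hm1 : 1 ≤ m) (hmn : 2 * m ≤ n) : L * 4 ^ m + 4 < 4 ^ n := by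
  have hmn' : m ≤ n := by omega
  have hnm : n ≤ 2 * (n - m) := by omega
  have h13 : n - 1 + 3 ≤ n + 2 := by omega
  have hsplit : 4 ^ n = 4 ^ m * 4 ^ (n - m) := by
    rw [← pow_add, Nat.add_sub_cancel' hmn']
  have hP4 : 4 ≤ 4 ^ m := by
    calc (4:Nat) = 4 ^ 1 := (pow_one 4).symm
      _ ≤ 4 ^ m := Nat.pow_le_pow_right (by norm_num) hm1
  have h2n : 2 ^ n ≤ 4 ^ (n - m) := by
    rw [show (4:Nat) = 2 ^ 2 from rfl, ← pow_mul]
    exact Nat.pow_le_pow_right (by norm_num) hnm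
  have hn2 : n + 2 ≤ 2 ^ n := pvTwoPow n hn
  have hbig : 4 ^ m * (n + 2) ≤ 4 ^ n := by
    rw [hsplit]
    exact Nat.mul_le_mul_left _ (le_trans hn2 h2n)
  have hLP : L * 4 ^ m ≤ (n - 1) * 4 ^ m := Nat.mul_le_mul_right _ hL
  have h3P : 12 ≤ 3 * 4 ^ m := Nat.mul_le_mul_left 3 hP4
  have hstep : (n - 1) * 4 ^ m + 3 * 4 ^ m ≤ (n + 2) * 4 ^ m := by
    rw [← Nat.add_mul]
    exact Nat.mul_le_mul_right _ h13
  calc L * 4 ^ m + 4 ≤ (n - 1) * 4 ^ m + 4 := Nat.add_le_add_right hLP 4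
    _ < (n - 1) * 4 ^ m + 12 := Nat.add_lt_add_left (by norm_num) _
    _ ≤ (n - 1) * 4 ^ m + 3 * 4 ^ m := Nat.add_le_add_left h3P _
    _ ≤ (n + 2) * 4 ^ m := hstep
    _ = 4 ^ m * (n + 2) := Nat.mul_comm _ _
    _ ≤ 4 ^ n := hbig

lemma pvArith (n L : Nat) (hn : 2 ≤ n) (hL : L ≤ n - 1) :
    L * 4 ^ (n / 2) + 4 < 4 ^ n := by
  apply pvArithCore n (n / 2) L hn hL
  · rw [show (1:Nat) = 2 / 2 from rfl]
    exact Nat.div_le_div_right hn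
  · rw [Nat.mul_comm]
    exact Nat.div_mul_le_self n 2

-- the frames pushed for one expanded node weigh strictly less than the node itself
lemma pvMuExpand {rem start : Int} (cur : List Int) (hs : 2 ≤ start) (hr : 2 ≤ rem) :
    pvMu (childrenB rem start cur ++
      (if start ≤ rem then [((1:Int), start, cur ++ [rem])] else [])) < pvW rem := by
  have hrn : 2 ≤ rem.toNat := by
    have h := Int.toNat_le_toNat hr
    simpa using h
  have hsum : pvMu (childrenB rem start cur) ≤
      (childrenB rem start cur).length * 4 ^ (rem.toNat / 2) := by
    have := List.sum_le_card_nsmul ((childrenB rem start cur).map (fun fr => pvW fr.1))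
      (4 ^ (rem.toNat / 2)) (by
        intro x hx
        obtain ⟨fr, hfr, hw⟩ := List.mem_map.mp hx
        rw [← hw]
        exact childrenB_weight hs (by omega) hfr)
    simpa [pvMu, smul_eq_mul] using this
  have hlen : (childrenB rem start cur).length ≤ rem.toNat - 1 := by
    have h5 := childrenB_length ((rem + 1 - start).toNat) rem start rfl cur
    have h1 : rem + 1 - start ≤ rem - 1 := by linarith
    have h2 := Int.toNat_le_toNat h1
    have h3 : (rem - 1).toNat = rem.toNat - 1 := Int.pred_toNat rem
    rw [h3] at h2
    exact le_trans h5 h2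
  have hterm : pvMu (if start ≤ rem then [((1:Int), start, cur ++ [rem])] else []) ≤ 4 := by
    split_ifs <;> simp [pvMu, pvW]
  rw [pvMuAppend, show pvW rem = 4 ^ rem.toNat from rfl]
  exact lt_of_le_of_lt (Nat.add_le_add hsum hterm) (pvArith rem.toNat _ hrn hlen)

-- all frames pushed by one expansion keep start ≥ 2
lemma pvStackInv {rem start : Int} {cur : List Int} {rest : List (Int × Int × List Int)}
    (hs : 2 ≤ start) (hrest : ∀ fr ∈ rest, 2 ≤ fr.2.1) :
    ∀ fr ∈ (childrenB rem start cur ++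
      (if start ≤ rem then [((1:Int), start, cur ++ [rem])] else [])) ++ rest,
      2 ≤ fr.2.1 := by
  intro fr hm
  rcases List.mem_append.mp hm with hm1 | hm2
  · rcases List.mem_append.mp hm1 with hc | ht
    · exact le_trans hs (childrenB_mem ((rem + 1 - start).toNat) rem start rfl cur fr hc).1
    · split_ifs at ht <;> simp at ht
      rw [ht]; exact hs
  · exact hrest fr hm2

-- the 'while stack' loop of B; the proof argument records that every frame's start is ≥ 2
-- (true throughout B's execution) and is used only for termination
def runB : (st : List (Int × Int × List Int)) → (∀ fr ∈ st, 2 ≤ fr.2.1) → List (List Int)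
  | [], _ => []
  | (rem, start, cur) :: rest, h =>
    if rem == 1 then
      cur :: runB rest (fun fr hm => h fr (List.mem_cons_of_mem _ hm))
    else if rem < 2 then
      runB rest (fun fr hm => h fr (List.mem_cons_of_mem _ hm))
    else
      runB ((childrenB rem start cur ++
          (if start ≤ rem then [((1:Int), start, cur ++ [rem])] else [])) ++ rest)
        (pvStackInv (h _ List.mem_cons_self) (fun fr hm => h fr (List.mem_cons_of_mem _ hm)))
termination_by st _ => pvMu st
decreasing_by
· rw [pvMuCons]
  have := pvWpos rem
  omega
· rw [pvMuCons]
  have := pvWpos rem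
  omega
· have hkey := pvMuExpand (rem := rem) (start := start) cur (h _ List.mem_cons_self)
    (pvGe2 (by assumption))
  simp only [dite_eq_ite]
  rw [pvMuAppend, pvMuCons]
  omega

def factor_multisets_alt (target : Int) : List (List Int) :=
  runB [(target, 2, [])] (by intro fr hm; simp at hm; simp [hm])

-- ===== PRECONDITION & SPEC =====
def Spec_factor_multisets (target : Int) (out : List (List Int)) : Prop := out = factor_multisets_alt target
instance (target : Int) (out : List (List Int)) : Decidable (Spec_factor_multisets target out) := by unfold Spec_factor_multisets; infer_instance

-- ===== CLAIM (what is proved, stated in full; the proofs are below) =====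
def Claim_equal_factor_multisets : Prop := ∀ (target : Int), Dom_factor_multisets target → Spec_factor_multisets target (factor_multisets target)

-- ===== LEMMAS AND PROOFS =====

-- the denotation of a stack frame: what A's recursion emits from that node
def denotA (fr : Int × Int × List Int) : List (List Int) := recA fr.1 fr.2.1 fr.2.2

lemma recA_one (s : Int) (c : List Int) : recA 1 s c = [c] := by
  rw [recA]; simp

lemma recA_of_lt {rem start : Int} (cur : List Int) (h1 : rem ≠ 1) (h2 : rem < start) :
    recA rem start cur = [] := by
  rw [recA, if_neg (by simpa using h1), loopA, if_neg (by omega)]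

lemma childrenB_pos {rem f : Int} {cur : List Int} (h : f * f ≤ rem) :
    childrenB rem f cur =
      (if PySem.Int.mod rem f == 0 then [(PySem.Int.floordiv rem f, f, cur ++ [f])] else [])
        ++ childrenB rem (f + 1) cur := by
  rw [childrenB, if_pos h]

lemma childrenB_neg {rem f : Int} {cur : List Int} (h : ¬ f * f ≤ rem) :
    childrenB rem f cur = [] := by
  rw [childrenB, if_neg h]

-- A's scan from f to rem emits exactly: the subtrees of B's divisor children, then the tail
lemma loopA_eq (k : Nat) : ∀ (rem f : Int), (rem + 1 - f).toNat = k → 2 ≤ f → 2 ≤ rem →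
    ∀ (cur : List Int),
      loopA rem f cur = (childrenB rem f cur).flatMap denotA ++
        (if f ≤ rem then [cur ++ [rem]] else []) := by
  induction k using Nat.strong_induction_on with
  | _ k IHk =>
    intro rem f hk hf hr cur
    by_cases hfr : f ≤ rem
    · rw [loopA, if_pos hfr, if_neg (by omega : ¬ f < 2)]
      have hrec := IHk ((rem + 1 - (f + 1)).toNat) (by omega) rem (f + 1) rfl (by omega) hr cur
      by_cases hsq : f * f ≤ rem
      · have hflt : f < rem := by nlinarith
        rw [hrec, childrenB_pos hsq, List.flatMap_append]
        have hbody : (if PySem.Int.mod rem f == 0 then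
              recA (PySem.Int.floordiv rem f) f (cur ++ [f]) else [])
            = (if PySem.Int.mod rem f == 0 then
              [(PySem.Int.floordiv rem f, f, cur ++ [f])] else []).flatMap denotA := by
          by_cases hm : PySem.Int.mod rem f == 0
          · rw [if_pos hm, if_pos hm]; simp [denotA]
          · rw [if_neg hm, if_neg hm]; simp
        rw [hbody, if_pos (by omega : f + 1 ≤ rem), if_pos hfr]
        simp [List.append_assoc]
      · rw [childrenB_neg hsq, if_pos hfr]
        have hnextC : childrenB rem (f + 1) cur = [] :=
          childrenB_neg (by nlinarith)
        by_cases heq : f = rem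
        · subst heq
          have hm : PySem.Int.mod f f == 0 := by
            have : PySem.Int.mod f f = f % f := PySem.Int.mod_eq_emod_of_pos (by omega)
            simp [this]
          have hd : PySem.Int.floordiv f f = 1 := by
            rw [PySem.Int.floordiv_eq_ediv_of_pos (by omega), Int.ediv_self (by omega)]
          rw [if_pos hm, hd, recA_one, hrec, hnextC, if_neg (by omega : ¬ f + 1 ≤ f)]
          simp
        · have hflt : f < rem := lt_of_le_of_ne hfr heq
          have hbody : (if PySem.Int.mod rem f == 0 then
                recA (PySem.Int.floordiv rem f) f (cur ++ [f]) else []) = [] := by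
            by_cases hm : PySem.Int.mod rem f == 0
            · rw [if_pos hm]
              have hdvd : f ∣ rem := by
                rw [← PySem.Int.mod_eq_zero_iff_dvd]
                simpa using hm
              have hdv : PySem.Int.floordiv rem f = rem / f :=
                PySem.Int.floordiv_eq_ediv_of_pos (by omega)
              have hmul : rem / f * f = rem := Int.ediv_mul_cancel hdvd
              have hq1 : 1 ≤ rem / f := by
                have := Int.ediv_nonneg (a := rem) (b := f) (by omega) (by omega)
                rcases (lt_or_eq_of_le this) with h | h
                · omega
                · exfalso; rw [← h] at hmul; simp at hmul; omega
              have hqne : rem / f ≠ 1 := by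
                intro h; rw [h] at hmul; omega
              have hqlt : rem / f < f := by nlinarith
              rw [hdv]
              exact recA_of_lt _ hqne hqlt
            · rw [if_neg hm]
          rw [hbody, hrec, hnextC, if_pos (by omega : f + 1 ≤ rem)]
          simp
    · rw [loopA, if_neg hfr, childrenB_neg (by nlinarith), if_neg hfr]
      simp

-- the stack loop computes the concatenated denotations of its frames
lemma runB_eq (k : Nat) : ∀ (st : List (Int × Int × List Int)), pvMu st = k →
    ∀ (h : ∀ fr ∈ st, 2 ≤ fr.2.1), runB st h = st.flatMap denotA := by
  induction k using Nat.strong_induction_on with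
  | _ k IH =>
    intro st hk h
    cases st with
    | nil => rw [runB]; simp
    | cons head rest =>
      obtain ⟨rem, start, cur⟩ := head
      have hs : 2 ≤ start := h _ List.mem_cons_self
      have hW : 0 < pvW rem := by simp [pvW]
      have hkc : pvW rem + pvMu rest = k := by simpa [pvMu] using hk
      rw [runB]
      by_cases h1 : rem = 1
      · subst h1
        rw [if_pos (by simp)]
        rw [IH (pvMu rest) (by omega) rest rfl _]
        simp [denotA, recA_one]
      · rw [if_neg (by simpa using h1)]
        by_cases h2 : rem < 2
        · rw [if_pos h2]
          rw [IH (pvMu rest) (by omega) rest rfl _]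
          have : denotA (rem, start, cur) = [] := by
            show recA rem start cur = []
            exact recA_of_lt cur h1 (by omega)
          simp [this]
        · rw [if_neg h2]
          have hkey := pvMuExpand (rem := rem) (start := start) cur hs (by omega)
          have hmu : pvMu ((childrenB rem start cur ++
              (if start ≤ rem then [((1:Int), start, cur ++ [rem])] else [])) ++ rest) < k := by
            have happ : ∀ (a b : List (Int × Int × List Int)), pvMu (a ++ b) = pvMu a + pvMu b := by
              intro a b; simp [pvMu]
            rw [happ]
            omega
          rw [IH _ hmu _ rfl _]
          have hhead : denotA (rem, start, cur) = (childrenB rem start cur).flatMap denotA ++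
              (if start ≤ rem then [cur ++ [rem]] else []) := by
            show recA rem start cur = _
            rw [recA, if_neg (by simpa using h1)]
            exact loopA_eq ((rem + 1 - start).toNat) rem start rfl hs (by omega) cur
          have hterm : (if start ≤ rem then [((1:Int), start, cur ++ [rem])] else []).flatMap
              denotA = (if start ≤ rem then [cur ++ [rem]] else []) := by
            split_ifs <;> simp [denotA, recA_one]
          simp only [List.flatMap_append, List.flatMap_cons, hterm, hhead,
            List.append_assoc]

-- ===== VERDICT (by name: the statement is the Claim_ definition above) =====
theorem factor_multisets_spec : Claim_equal_factor_multisets := by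
  intro target _
  unfold Spec_factor_multisets factor_multisets factor_multisets_alt
  rw [runB_eq (pvMu [(target, 2, [])]) _ rfl _]
  simp [denotA]
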